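-- pv_equiv track=rewrite | github.com/GQChem/ProteinNotebooks | HelpScripts/pmpnn_loop_finale.py | sele_to_list
-- ===== SOURCE A (Python) =====
-- def sele_to_list(s):
--     a = []
--     if s == "": return a
--     elif '+' in s:
--         plus_parts = s.split('+')
--         for pp in plus_parts:
--             if '-' in pp:
--                 min,max = pp.split('-')
--                 for ri in range(int(min),int(max)+1):
--                     a.append(ri)
--             else:
--                 a.append(int(pp))
--     else:
--         if '-' in s:
--             min,max = s.split('-')
--             for ri in range(int(min),int(max)+1):
--                 a.append(ri)
--         else:
--             a.append(int(s))
--     return a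
-- ===== SOURCE B (Python) =====
-- def sele_to_list(s):
--     if s == "":
--         return []
--     pairs = []
--     for tok in s.split('+'):
--         if '-' in tok:
--             lo, hi = tok.split('-')
--             pairs.append((int(lo), int(hi)))
--         else:
--             pairs.append((int(tok), int(tok)))
--     out = []
--     for lo, hi in pairs:
--         out.extend(range(lo, hi + 1))
--     return out
-- ===== Notes on version B (the rewrite author's own statement) =====
-- stated objective: simpler
-- what changed: B splits the string on the plus separator unconditionally and works in two phases (parse every token into a (lo,hi) pair, then expand each pair with range), removing A's duplicated single-token else branch and its nested per-branch append loops.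
import Mathlib
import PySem

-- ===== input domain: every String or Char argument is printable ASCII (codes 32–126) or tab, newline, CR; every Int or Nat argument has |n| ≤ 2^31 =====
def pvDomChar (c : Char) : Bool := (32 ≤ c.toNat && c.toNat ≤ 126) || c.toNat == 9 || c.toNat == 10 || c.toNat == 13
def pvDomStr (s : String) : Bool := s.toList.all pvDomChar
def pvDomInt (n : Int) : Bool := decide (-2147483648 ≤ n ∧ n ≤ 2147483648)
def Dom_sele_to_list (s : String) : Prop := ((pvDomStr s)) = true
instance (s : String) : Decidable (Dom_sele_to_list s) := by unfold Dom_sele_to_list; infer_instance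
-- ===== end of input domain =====

-- B splits on '+' unconditionally and works in two phases (parse tokens to (lo,hi) pairs, then expand),
-- removing A's duplicated '+'-free branch; objective: simpler, not faster.


-- ===== PORT A =====
-- Literal port of A; where the Python raises (int('') etc.) a PySem primitive returns none and the
-- port's `match` fallback arm fires — those inputs are excluded by Pre_ below.
def sele_to_list (s : String) : List Int :=
  if s = "" then []
  else if PySem.Str.isIn "+" s then
    (PySem.Chars.splitOn s.toList ['+']).foldl (fun a pp =>
      if PySem.Chars.isIn ['-'] pp then
        match PySem.Chars.splitOn pp ['-'] with
        | [mn, mx] =>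
          match PySem.Int.ofChars? mn, PySem.Int.ofChars? mx with
          | some lo, some hi => (PySem.List.pyRange lo (hi + 1) 1).foldl (fun a2 ri => a2 ++ [ri]) a
          | _, _ => a   -- unreachable under Pre_ (Python raises ValueError)
        | _ => a        -- unreachable under Pre_ (unpacking raises ValueError)
      else
        match PySem.Int.ofChars? pp with
        | some v => a ++ [v]
        | none => a) []  -- unreachable under Pre_ (Python raises ValueError)
  else
    if PySem.Chars.isIn ['-'] s.toList then
      match PySem.Chars.splitOn s.toList ['-'] with
      | [mn, mx] =>
        match PySem.Int.ofChars? mn, PySem.Int.ofChars? mx with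
        | some lo, some hi => (PySem.List.pyRange lo (hi + 1) 1).foldl (fun a2 ri => a2 ++ [ri]) []
        | _, _ => []    -- unreachable under Pre_
      | _ => []         -- unreachable under Pre_
    else
      match PySem.Int.ofChars? s.toList with
      | some v => [v]
      | none => []      -- unreachable under Pre_

-- ===== PORT B =====
def sele_to_list_alt (s : String) : List Int :=
  if s = "" then []
  else
    let pairs : List (Int × Int) :=
      (PySem.Chars.splitOn s.toList ['+']).foldl (fun ps tok =>
        if PySem.Chars.isIn ['-'] tok then
          -- 'lo, hi = tok.split('-')': under Pre_ the split has exactly two parts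
          let parts := PySem.Chars.splitOn tok ['-']
          ps ++ [((PySem.Int.ofChars? (parts.getD 0 [])).getD 0,
                  (PySem.Int.ofChars? (parts.getD 1 [])).getD 0)]
        else
          ps ++ [((PySem.Int.ofChars? tok).getD 0, (PySem.Int.ofChars? tok).getD 0)]) []
    pairs.foldl (fun out p => out ++ PySem.List.pyRange p.1 (p.2 + 1) 1) []

-- ===== PRECONDITION & SPEC =====
-- Pre_ excludes exactly the inputs on which A raises ValueError: some plus-separated token is
-- neither a valid int literal nor a dash-separated pair of valid int literals.
def pvTokOK (tok : List Char) : Bool :=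
  if PySem.Chars.isIn ['-'] tok then
    let parts := PySem.Chars.splitOn tok ['-']
    parts.length == 2 && (PySem.Int.ofChars? (parts.getD 0 [])).isSome
      && (PySem.Int.ofChars? (parts.getD 1 [])).isSome
  else (PySem.Int.ofChars? tok).isSome

def Pre_sele_to_list (s : String) : Prop :=
  s = "" ∨ ∀ tok ∈ PySem.Chars.splitOn s.toList ['+'], pvTokOK tok = true
instance (s : String) : Decidable (Pre_sele_to_list s) := by unfold Pre_sele_to_list; infer_instance

def pvWitness_sele_to_list : String := "1-3+7"

def Spec_sele_to_list (s : String) (out : List Int) : Prop := out = sele_to_list_alt s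
instance (s : String) (out : List Int) : Decidable (Spec_sele_to_list s out) := by unfold Spec_sele_to_list; infer_instance

-- ===== CLAIM (what is proved, stated in full; the proofs are below) =====
def Claim_equal_sele_to_list : Prop := ∀ (s : String), Dom_sele_to_list s → Pre_sele_to_list s → Spec_sele_to_list s (sele_to_list s)

-- ===== LEMMAS AND PROOFS =====

-- splitOn with a separator that does not occur returns the whole string as the single token.
theorem splitOn_go_of_not_infix (sep : List Char) (fuel : Nat) (l cur : List Char)
    (acc : List (List Char)) (h : ¬ sep <:+: l) :
    PySem.Chars.splitOn.go sep fuel l cur acc = ((cur.reverse ++ l) :: acc).reverse := by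
  induction fuel generalizing l cur with
  | zero => rfl
  | succ fuel ih =>
    cases l with
    | nil => simp [PySem.Chars.splitOn.go]
    | cons c rest =>
      have hpre : sep.isPrefixOf (c :: rest) = false := by
        by_contra hc
        exact h ((List.isPrefixOf_iff_prefix.mp (by simpa using hc)).isInfix)
      have hrest : ¬ sep <:+: rest := fun hi => h (List.infix_cons hi)
      simp [PySem.Chars.splitOn.go, hpre, ih rest (c :: cur) hrest]

theorem splitOn_of_not_isIn (sep cs : List Char) (h : PySem.Chars.isIn sep cs = false) :
    PySem.Chars.splitOn cs sep = [cs] := by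
  have hinf : ¬ sep <:+: cs := (PySem.Chars.isIn_eq_false_iff sep cs).mp h
  simp [PySem.Chars.splitOn, splitOn_go_of_not_infix sep _ cs [] [] hinf]

-- the value of a parsed token as a (lo, hi) pair (proof-side characterisation; not used by the ports)
def pvPair (tok : List Char) : Int × Int :=
  if PySem.Chars.isIn ['-'] tok then
    let parts := PySem.Chars.splitOn tok ['-']
    ((PySem.Int.ofChars? (parts.getD 0 [])).getD 0, (PySem.Int.ofChars? (parts.getD 1 [])).getD 0)
  else ((PySem.Int.ofChars? tok).getD 0, (PySem.Int.ofChars? tok).getD 0)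

-- A's per-token work, under pvTokOK, appends the expansion of the token's pair.
theorem tok_step (a : List Int) (tok : List Char) (h : pvTokOK tok = true) :
    (if PySem.Chars.isIn ['-'] tok then
        match PySem.Chars.splitOn tok ['-'] with
        | [mn, mx] =>
          match PySem.Int.ofChars? mn, PySem.Int.ofChars? mx with
          | some lo, some hi => (PySem.List.pyRange lo (hi + 1) 1).foldl (fun a2 ri => a2 ++ [ri]) a
          | _, _ => a
        | _ => a
      else
        match PySem.Int.ofChars? tok with
        | some v => a ++ [v]
        | none => a)
      = a ++ PySem.List.pyRange (pvPair tok).1 ((pvPair tok).2 + 1) 1 := by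
  unfold pvTokOK pvPair at *
  by_cases hd : PySem.Chars.isIn ['-'] tok = true
  · simp only [hd, if_true] at *
    match hsp : PySem.Chars.splitOn tok ['-'] with
    | [mn, mx] =>
      cases hlo : PySem.Int.ofChars? mn with
      | none => simp [hsp, hlo] at h
      | some lo =>
        cases hhi : PySem.Int.ofChars? mx with
        | none => simp [hsp, hlo, hhi] at h
        | some hi =>
          simp [hlo, hhi]
          induction PySem.List.pyRange lo (hi + 1) 1 with
          | nil => rfl
          | cons x t ih => simp [ih]
    | [] => simp [hsp] at h
    | [x] => simp [hsp] at h
    | x :: y :: z :: r => simp [hsp] at h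
  · have hd' : PySem.Chars.isIn ['-'] tok = false := by simpa using hd
    simp only [hd', if_false, Bool.false_eq_true] at *
    obtain ⟨v, hv⟩ := Option.isSome_iff_exists.mp h
    simp [hv]

-- B's pair-building step, under pvTokOK, appends the token's pair.
theorem tok_pair (ps : List (Int × Int)) (tok : List Char) :
    (if PySem.Chars.isIn ['-'] tok then
        let parts := PySem.Chars.splitOn tok ['-']
        ps ++ [((PySem.Int.ofChars? (parts.getD 0 [])).getD 0,
                (PySem.Int.ofChars? (parts.getD 1 [])).getD 0)]
      else
        ps ++ [((PySem.Int.ofChars? tok).getD 0, (PySem.Int.ofChars? tok).getD 0)])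
      = ps ++ [pvPair tok] := by
  unfold pvPair
  by_cases hd : PySem.Chars.isIn ['-'] tok = true
  · simp only [hd, if_true]
  · have hd' : PySem.Chars.isIn ['-'] tok = false := by simpa using hd
    simp only [hd', if_false, Bool.false_eq_true]

-- both programs, on a token list all of whose tokens are OK, produce the same flat expansion
theorem folds_eq (toks : List (List Char)) (h : ∀ tok ∈ toks, pvTokOK tok = true) :
    (toks.foldl (fun a pp =>
      if PySem.Chars.isIn ['-'] pp then
        match PySem.Chars.splitOn pp ['-'] with
        | [mn, mx] =>
          match PySem.Int.ofChars? mn, PySem.Int.ofChars? mx with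
          | some lo, some hi => (PySem.List.pyRange lo (hi + 1) 1).foldl (fun a2 ri => a2 ++ [ri]) a
          | _, _ => a
        | _ => a
      else
        match PySem.Int.ofChars? pp with
        | some v => a ++ [v]
        | none => a) [])
    = (toks.foldl (fun ps tok =>
        if PySem.Chars.isIn ['-'] tok then
          let parts := PySem.Chars.splitOn tok ['-']
          ps ++ [((PySem.Int.ofChars? (parts.getD 0 [])).getD 0,
                  (PySem.Int.ofChars? (parts.getD 1 [])).getD 0)]
        else
          ps ++ [((PySem.Int.ofChars? tok).getD 0, (PySem.Int.ofChars? tok).getD 0)]) []).foldl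
        (fun out p => out ++ PySem.List.pyRange p.1 (p.2 + 1) 1) [] := by
  have h1 := PySem.List.foldl_congr_mem toks _ _ ([] : List Int)
      (fun a tok hm => tok_step a tok (h tok hm))
  have h2 := PySem.List.foldl_congr_mem toks _ _ ([] : List (Int × Int))
      (fun ps tok _ => tok_pair ps tok)
  rw [h1, h2, PySem.List.foldl_append_singleton_eq_map, List.nil_append, List.foldl_map]

-- ===== VERDICT (by name: the statement is the Claim_ definition above) =====
theorem sele_to_list_spec : Claim_equal_sele_to_list := by
  intro s _ hpre
  unfold Spec_sele_to_list sele_to_list sele_to_list_alt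
  by_cases hs : s = ""
  · simp [hs]
  · rcases hpre with h0 | htoks
    · exact absurd h0 hs
    rw [if_neg hs, if_neg hs]
    by_cases hplus : PySem.Str.isIn "+" s = true
    · simp only [hplus, if_true]
      exact folds_eq _ htoks
    · have hbool : PySem.Str.isIn "+" s = false := by simpa using hplus
      have hplus' : PySem.Chars.isIn ['+'] s.toList = false := by simpa using hbool
      have hsp : PySem.Chars.splitOn s.toList ['+'] = [s.toList] :=
        splitOn_of_not_isIn ['+'] s.toList hplus'
      have hok : pvTokOK s.toList = true := htoks s.toList (by rw [hsp]; exact List.mem_singleton.mpr rfl)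
      simp only [hbool, Bool.false_eq_true, if_false]
      have := folds_eq [s.toList] (by intro tok hm; rw [List.mem_singleton] at hm; exact hm ▸ hok)
      simpa [hsp] using this
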